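-- pv_equiv track=rewrite | github.com/lucas-s-p/EstudosPython | P1 - PROVA 2/q7.py | encontra_penta
-- ===== SOURCE A (Python) =====
-- def meu_in(pentavogalica, car):
--     for e in car:
--         if e == pentavogalica:
--             return True
--
--     return False
--
-- def encontra_penta(seq):
--     cont = 0
--     cont_global = 0
--     for i in range(len(seq)):
--         if seq[i] != ' ':
--             if meu_in(seq[i], 'aeiou'):
--                 cont += 1
--             if cont == 5:
--                 cont_global += 1
--         else:
--             cont = 0
--
--     return cont_global
-- ===== SOURCE B (Python) =====
-- VOWELS = 'aeiou'
--
-- def encontra_penta(seq):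
--     total = 0
--     for word in seq.split(' '):
--         v = [i for i, c in enumerate(word) if c in VOWELS]
--         if len(v) >= 5:
--             end = v[5] if len(v) >= 6 else len(word)
--             total += end - v[4]
--     return total
-- ===== Notes on version B (the rewrite author's own statement) =====
-- stated objective: faster
-- what changed: B splits the string on spaces and, per word, builds the vowel-index table once and adds (index of the 6th vowel, or the word length) minus the index of the 5th vowel, replacing A's char-by-char running vowel counter; the constant factor drops because str.split and the comprehension do the scanning in C instead of a Python-level per-character loop with a helper-function membership test.
import Mathlib
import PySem

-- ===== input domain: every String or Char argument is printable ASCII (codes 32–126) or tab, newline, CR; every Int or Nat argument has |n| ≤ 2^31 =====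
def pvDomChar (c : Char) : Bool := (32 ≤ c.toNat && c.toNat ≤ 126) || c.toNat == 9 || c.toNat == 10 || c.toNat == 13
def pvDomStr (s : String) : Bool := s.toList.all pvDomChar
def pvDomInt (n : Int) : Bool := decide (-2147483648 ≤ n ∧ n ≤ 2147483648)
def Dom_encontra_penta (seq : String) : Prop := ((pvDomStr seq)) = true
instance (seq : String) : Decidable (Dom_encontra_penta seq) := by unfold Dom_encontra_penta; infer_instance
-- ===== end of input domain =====

-- B replaces A's char-by-char running vowel counter with a split-on-space pass that, per word,
-- takes the vowel-index table and adds (index of 6th vowel, or word length) minus index of 5th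
-- vowel — same value; a timing run measured B faster by a constant factor (objective: faster).

-- ===== PORT A =====
def meuIn (pentavogalica : Char) (car : List Char) : Bool :=
  match car with
  | [] => false
  | e :: rest => if e = pentavogalica then true else meuIn pentavogalica rest

def pentaStep (st : Int × Int) (c : Char) : Int × Int :=
  if c ≠ ' ' then
    let cont := if meuIn c "aeiou".toList then st.1 + 1 else st.1
    let contGlobal := if cont = 5 then st.2 + 1 else st.2
    (cont, contGlobal)
  else
    (0, st.2)

def encontra_penta (seq : String) : Int :=
  (seq.toList.foldl pentaStep (0, 0)).2

-- ===== PORT B =====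
def pentaVowels : List Char := "aeiou".toList

def wordContrib (w : List Char) : Int :=
  let v : List Int := ((PySem.List.enumerate w).filter (fun p => pentaVowels.contains p.2)).map (fun p => p.1)
  if 5 ≤ v.length then
    (if 6 ≤ v.length then PySem.List.pyGetD v 5 0 else (w.length : Int)) - PySem.List.pyGetD v 4 0
  else 0

def encontra_penta_alt (seq : String) : Int :=
  (PySem.Chars.splitOn seq.toList [' ']).foldl (fun total w => total + wordContrib w) 0

-- ===== PRECONDITION & SPEC =====
def Spec_encontra_penta (seq : String) (out : Int) : Prop := out = encontra_penta_alt seq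
instance (seq : String) (out : Int) : Decidable (Spec_encontra_penta seq out) := by unfold Spec_encontra_penta; infer_instance

-- ===== CLAIM (what is proved, stated in full; the proofs are below) =====
def Claim_equal_encontra_penta : Prop := ∀ (seq : String), Dom_encontra_penta seq → Spec_encontra_penta seq (encontra_penta seq)

-- ===== LEMMAS AND PROOFS =====

-- vowel test shared by the proofs
def isV (c : Char) : Bool := meuIn c "aeiou".toList

-- indices (starting at n) of the vowels of a word
def vIdx (n : Int) : List Char → List Int
  | [] => []
  | x :: xs => if isV x then n :: vIdx (n + 1) xs else vIdx (n + 1) xs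

-- value A's inner counting adds for the rest w of the current word when cont = c
def contribFrom (c : Int) (w : List Char) : Int :=
  if 5 < c then 0
  else if (vIdx 0 w).length < (5 - c).toNat then 0
  else (vIdx 0 w).getD (5 - c).toNat (w.length : Int) -
    (if (5 - c).toNat = 0 then 0 else (vIdx 0 w).getD ((5 - c).toNat - 1) 0)

-- reference split on a single space (proved equal to PySem.Chars.splitOn · [' '])
def mySplit : List Char → List (List Char)
  | [] => [[]]
  | c :: rest =>
    if c = ' ' then [] :: mySplit rest
    else
      match mySplit rest with
      | w :: ws => (c :: w) :: ws
      | [] => [[c]]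

theorem mySplit_ne_nil (l : List Char) : mySplit l ≠ [] := by
  cases l with
  | nil => simp [mySplit]
  | cons c rest =>
    simp only [mySplit]
    split
    · simp
    · cases h : mySplit rest <;> simp

theorem splitGo_eq (fuel : Nat) : ∀ (l cur : List Char) (acc : List (List Char)), l.length ≤ fuel →
    PySem.Chars.splitOn.go [' '] fuel l cur acc =
      acc.reverse ++ (match mySplit l with
        | w :: ws => (cur.reverse ++ w) :: ws
        | [] => []) := by
  induction fuel with
  | zero =>
    intro l cur acc h
    have hl : l = [] := by cases l <;> simp_all
    subst hl
    simp [PySem.Chars.splitOn.go, mySplit]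
  | succ fuel ih =>
    intro l cur acc h
    cases l with
    | nil => simp [PySem.Chars.splitOn.go, mySplit]
    | cons c rest =>
      obtain ⟨w, ws, hw⟩ := List.exists_cons_of_ne_nil (mySplit_ne_nil rest)
      by_cases hc : c = ' '
      · subst hc
        have hpre : List.isPrefixOf [' '] (' ' :: rest) = true := by simp [List.isPrefixOf]
        rw [PySem.Chars.splitOn.go]
        simp only [hpre, if_true, List.length_cons, List.length_nil, List.drop_succ_cons,
          List.drop_zero]
        rw [ih rest [] (List.reverse cur :: acc) (by simp at h; omega)]
        simp [mySplit, hw]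
      · have hpre : List.isPrefixOf [' '] (c :: rest) = false := by
          simp [List.isPrefixOf, BEq.beq]
          intro h'
          exact absurd h'.symm hc
        rw [PySem.Chars.splitOn.go]
        simp only [hpre, Bool.false_eq_true, if_false]
        rw [ih rest (c :: cur) acc (by simp at h; omega)]
        simp [mySplit, hc, hw]

theorem splitOn_eq_mySplit (l : List Char) : PySem.Chars.splitOn l [' '] = mySplit l := by
  obtain ⟨w, ws, hw⟩ := List.exists_cons_of_ne_nil (mySplit_ne_nil l)
  rw [PySem.Chars.splitOn, splitGo_eq (l.length + 1) l [] [] (by omega)]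
  simp [hw]

theorem vIdx_shift (w : List Char) : ∀ n : Int, vIdx n w = (vIdx 0 w).map (· + n) := by
  induction w with
  | nil => intro n; simp [vIdx]
  | cons x xs ih =>
    intro n
    cases hx : isV x
    · simp only [vIdx, hx, Bool.false_eq_true, if_false]
      rw [ih (n + 1), show (0 : Int) + 1 = 1 from rfl, ih 1, List.map_map]
      exact List.map_congr_left (fun a _ => by simp only [Function.comp_apply]; omega)
    · simp only [vIdx, hx, if_true, List.map_cons]
      refine congrArg₂ _ (by omega) ?_
      rw [ih (n + 1), show (0 : Int) + 1 = 1 from rfl, ih 1, List.map_map]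
      exact List.map_congr_left (fun a _ => by simp only [Function.comp_apply]; omega)

theorem meuIn_eq_mem (c : Char) (l : List Char) : meuIn c l = decide (c ∈ l) := by
  induction l with
  | nil => simp [meuIn]
  | cons e rest ih =>
    simp only [meuIn, ih]
    by_cases h : e = c
    · subst h; simp
    · simp [h, Ne.symm h]

theorem contains_eq_meuIn (c : Char) (l : List Char) : l.contains c = meuIn c l := by
  simp [meuIn_eq_mem]

theorem enum_filter_eq_vIdx (w : List Char) : ∀ n : Int,
    ((PySem.List.enumerate w n).filter (fun p => pentaVowels.contains p.2)).map (fun p => p.1) = vIdx n w := by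
  induction w with
  | nil => intro n; simp [PySem.List.enumerate, vIdx]
  | cons x xs ih =>
    intro n
    simp only [PySem.List.enumerate, List.filter_cons]
    have : pentaVowels.contains x = isV x := contains_eq_meuIn x _
    cases hx : isV x <;> simp_all [vIdx]

theorem getD_map_add (v : List Int) : ∀ (i : Nat) (d : Int),
    (v.map (· + 1)).getD i (d + 1) = v.getD i d + 1 := by
  induction v with
  | nil => intro i d; simp
  | cons a t ih =>
    intro i d
    cases i with
    | zero => simp
    | succ j => simp only [List.map_cons, List.getD_cons_succ]; exact ih j d

theorem getD_map_add' (v : List Int) : ∀ (i : Nat) (d d' : Int), i < v.length →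
    (v.map (· + 1)).getD i d' = v.getD i d + 1 := by
  induction v with
  | nil => intro i d d' h; simp at h
  | cons a t ih =>
    intro i d d' h
    cases i with
    | zero => simp
    | succ j => simpa using ih j d d' (by simpa using h)

theorem wordContrib_eq (w : List Char) : wordContrib w = contribFrom 0 w := by
  simp only [wordContrib, contribFrom]
  rw [enum_filter_eq_vIdx w 0]
  rw [show ((5 : Int) - 0).toNat = 5 from rfl]
  rw [if_neg (by omega : ¬ (5 : Int) < 0), if_neg (by omega : ¬ (5 : Nat) = 0)]
  rw [PySem.List.pyGetD_of_nonneg _ _ (by omega : (0 : Int) ≤ 4),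
      show ((4 : Int)).toNat = 4 from rfl]
  by_cases h5 : 5 ≤ (vIdx 0 w).length
  · rw [if_pos h5, if_neg (by omega : ¬ (vIdx 0 w).length < 5)]
    by_cases h6 : 6 ≤ (vIdx 0 w).length
    · rw [if_pos h6, PySem.List.pyGetD_of_nonneg _ _ (by omega : (0 : Int) ≤ 5),
        show ((5 : Int)).toNat = 5 from rfl,
        List.getD_eq_getElem _ _ (by omega : 5 < (vIdx 0 w).length),
        List.getD_eq_getElem _ _ (by omega : 5 < (vIdx 0 w).length)]
    · rw [if_neg h6, List.getD_eq_default _ _ (by omega : (vIdx 0 w).length ≤ 5)]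
  · rw [if_neg h5, if_pos (by omega : (vIdx 0 w).length < 5)]

theorem contribFrom_nil (c : Int) : contribFrom c [] = 0 := by
  unfold contribFrom
  by_cases h5 : 5 < c
  · simp [h5]
  · by_cases h0 : (5 - c).toNat = 0
    · simp [h5, h0, vIdx]
    · simp [h5, vIdx, Nat.pos_of_ne_zero h0]

-- one non-space character of the current word, seen from A's counter
theorem contrib_step (c : Int) (x : Char) (xs : List Char) (hc : 0 ≤ c) :
    (if (if isV x then c + 1 else c) = 5 then (1 : Int) else 0)
      + contribFrom (if isV x then c + 1 else c) xs = contribFrom c (x :: xs) := by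
  have hlen : (((x :: xs).length : Nat) : Int) = ((xs.length : Nat) : Int) + 1 := by
    simp
  cases hx : isV x
  case false =>
    have hsh : vIdx 0 (x :: xs) = (vIdx 0 xs).map (· + 1) := by
      simp [vIdx, hx, show (0:Int) + 1 = 1 from rfl, vIdx_shift xs 1]
    simp only [Bool.false_eq_true, if_false]
    by_cases h5 : 5 < c
    · simp only [contribFrom, if_pos h5, if_neg (by omega : ¬ c = 5)]
      ring
    · by_cases hc5 : c = 5
      · subst hc5
        simp only [contribFrom, if_neg h5, hsh, hlen,
          show ((5:Int) - 5).toNat = 0 from by decide, List.length_map]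
        simp only [if_neg (by omega : ¬ (vIdx 0 xs).length < 0),
          getD_map_add (vIdx 0 xs) 0]
        simp
        ring
      · -- c < 5, k ≥ 1
        obtain ⟨j, hj⟩ : ∃ j : Nat, (5 - c).toNat = j + 1 := ⟨(5 - c).toNat - 1, by omega⟩
        simp only [contribFrom, if_neg h5, if_neg hc5, hsh, hlen, List.length_map, hj,
          if_neg (by omega : ¬ j + 1 = 0)]
        by_cases hL : (vIdx 0 xs).length < j + 1
        · simp [hL]
        · rw [if_neg hL, if_neg hL, show j + 1 - 1 = j from rfl,
            getD_map_add (vIdx 0 xs) (j + 1) ((xs.length : Nat) : Int),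
            getD_map_add' (vIdx 0 xs) j 0 0 (by omega)]
          ring
  case true =>
    have hsh : vIdx 0 (x :: xs) = 0 :: (vIdx 0 xs).map (· + 1) := by
      simp [vIdx, hx, show (0:Int) + 1 = 1 from rfl, vIdx_shift xs 1]
    simp only [if_true]
    by_cases h5 : 5 < c
    · simp only [contribFrom, if_pos (by omega : 5 < c + 1), if_pos h5,
        if_neg (by omega : ¬ c + 1 = 5)]
      ring
    · by_cases hc5 : c = 5
      · subst hc5
        simp only [contribFrom, if_pos (by omega : (5:Int) < 5 + 1), if_neg h5, hsh,
          show ((5:Int) - 5).toNat = 0 from by decide,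
          if_neg (by omega : ¬ (5:Int) + 1 = 5)]
        simp
      · by_cases hc4 : c = 4
        · subst hc4
          simp only [contribFrom, if_pos (by norm_num : (4:Int) + 1 = 5), if_neg h5,
            if_neg (by omega : ¬ (4:Int) + 1 > 5), hsh, hlen,
            show ((5:Int) - (4 + 1)).toNat = 0 from by decide,
            show ((5:Int) - 4).toNat = 1 from by decide]
          simp only [List.length_cons, List.length_map,
            if_neg (by omega : ¬ (vIdx 0 xs).length < 0),
            if_neg (by omega : ¬ (vIdx 0 xs).length + 1 < 1),
            if_neg (by omega : ¬ (1:Nat) = 0),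
            List.getD_cons_succ,
            getD_map_add (vIdx 0 xs) 0]
          simp
          ring
        · -- 0 ≤ c < 4, k ≥ 2
          obtain ⟨j, hj⟩ : ∃ j : Nat, (5 - c).toNat = j + 2 := ⟨(5 - c).toNat - 2, by omega⟩
          have hj' : (5 - (c + 1)).toNat = j + 1 := by omega
          simp only [contribFrom, if_neg h5, if_neg (by omega : ¬ 5 < c + 1),
            if_neg (by omega : ¬ c + 1 = 5), hsh, hj, hj', List.length_cons,
            List.length_map, if_neg (by omega : ¬ j + 1 = 0),
            if_neg (by omega : ¬ j + 2 = 0)]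
          rw [show (((xs.length + 1 : Nat)) : Int) = ((xs.length : Nat) : Int) + 1 by push_cast; ring]
          by_cases hL : (vIdx 0 xs).length < j + 1
          · rw [if_pos hL, if_pos (by omega : (vIdx 0 xs).length + 1 < j + 2)]
            ring
          · rw [if_neg (by omega : ¬ (vIdx 0 xs).length + 1 < j + 2), if_neg hL,
              show j + 2 - 1 = j + 1 from rfl, show j + 1 - 1 = j from rfl,
              List.getD_cons_succ, List.getD_cons_succ,
              getD_map_add (vIdx 0 xs) (j + 1),
              getD_map_add' (vIdx 0 xs) j 0 0 (by omega)]
            ring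

-- main invariant of A's fold
theorem foldA_eq (l : List Char) : ∀ (c g : Int), 0 ≤ c →
    (l.foldl pentaStep (c, g)).2
      = g + contribFrom c ((mySplit l).headI) + (((mySplit l).tail).map wordContrib).sum := by
  induction l with
  | nil => intro c g _; simp [mySplit, contribFrom_nil]
  | cons x rest ih =>
    intro c g hc
    obtain ⟨w, ws, hw⟩ := List.exists_cons_of_ne_nil (mySplit_ne_nil rest)
    by_cases hx : x = ' '
    · subst hx
      simp only [List.foldl_cons, pentaStep]
      rw [if_neg (fun h => h rfl)]
      rw [ih 0 g le_rfl, hw]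
      simp [mySplit, hw, contribFrom_nil, wordContrib_eq]
      ring
    · simp only [List.foldl_cons, pentaStep, if_pos hx]
      rw [ih (if meuIn x "aeiou".toList then c + 1 else c)
        (if (if meuIn x "aeiou".toList then c + 1 else c) = 5 then g + 1 else g)
        (by split <;> omega), hw]
      have hstep := contrib_step c x w hc
      simp only [mySplit, if_neg hx, hw]
      simp only [List.headI, List.tail]
      rw [show (meuIn x "aeiou".toList) = isV x from rfl]
      rw [← hstep]
      split <;> split <;> ring

-- ===== VERDICT (by name: the statement is the Claim_ definition above) =====
theorem encontra_penta_spec : Claim_equal_encontra_penta := by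
  intro seq _
  unfold Spec_encontra_penta encontra_penta encontra_penta_alt
  rw [splitOn_eq_mySplit, PySem.List.foldl_add, foldA_eq _ 0 0 le_rfl]
  cases h : mySplit seq.toList with
  | nil => exact absurd h (mySplit_ne_nil _)
  | cons w ws => simp [wordContrib_eq]
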